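-- pv_equiv track=rewrite | github.com/svetlanasieber/AI-and-Machine-Learning_Upskill_Program | Algorithms with Python/12. Exam Preparation/03.Arbitrage.py | reconstruct_cycle
-- ===== SOURCE A (Python) =====
-- def reconstruct_cycle(predecessors, start):
--     path = []
--     current = start
--     visited = set()
--
--     while current not in visited:
--         visited.add(current)
--         path.append(current)
--         current = predecessors[current]
--         if current is None:
--             return []
--
--
--     cycle_start = current
--     cycle = [cycle_start]
--     current = predecessors[cycle_start]
--     while current != cycle_start:
--         cycle.append(current)
--         current = predecessors[current]
--     cycle.append(cycle_start)  # Close the cycle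
--     return cycle[::-1]
-- ===== SOURCE B (Python) =====
-- def reconstruct_cycle(predecessors, start):
--     path = []
--     index = {}
--     current = start
--     while current not in index:
--         nxt = predecessors[current]
--         if nxt is None:
--             return []
--         index[current] = len(path)
--         path.append(current)
--         current = nxt
--     i = index[current]
--     return [current] + path[i:][::-1]
-- ===== Notes on version B (the rewrite author's own statement) =====
-- stated objective: simpler
-- what changed: B does a single walk that records each node's position in a dict and returns the cycle as a reversed slice of the already-collected path, replacing A's separate visited-set walk plus second cycle-retracing loop.
-- outside the precondition, e.g. on reconstruct_cycle({'a': None, 'b': 'z'}, 'a'): A returns [], B returns []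
import Mathlib
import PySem

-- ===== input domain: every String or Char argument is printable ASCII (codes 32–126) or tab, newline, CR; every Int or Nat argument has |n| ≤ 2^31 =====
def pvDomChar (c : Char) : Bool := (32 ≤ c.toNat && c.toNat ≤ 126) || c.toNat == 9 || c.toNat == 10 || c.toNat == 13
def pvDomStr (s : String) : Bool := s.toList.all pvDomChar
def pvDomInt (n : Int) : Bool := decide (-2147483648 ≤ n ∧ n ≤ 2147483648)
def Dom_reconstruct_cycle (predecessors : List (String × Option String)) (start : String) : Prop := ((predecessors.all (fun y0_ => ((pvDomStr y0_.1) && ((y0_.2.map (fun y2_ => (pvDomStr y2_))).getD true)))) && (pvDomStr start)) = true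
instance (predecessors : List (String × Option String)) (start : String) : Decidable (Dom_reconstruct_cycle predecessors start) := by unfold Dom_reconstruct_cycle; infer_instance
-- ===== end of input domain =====

-- B replaces A's visited-set walk plus second cycle-retracing loop by a single walk that
-- records each node's position in a dict and slices the collected path (objective: simpler).

-- ===== PORT A =====
-- A's second while loop (retracing the cycle). `cur : Option String` because Python's
-- `current` could be None there; fuel only makes the recursion total (under Pre_ it never runs out).
def pvLoop2 (d : PySem.Dict String (Option String)) (cstart : String) :
    Nat → Option String → List String → List String
  | 0, _, _ => []
  | fuel+1, cur, cyc =>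
    if cur = some cstart then (cyc ++ [cstart]).reverse
    else
      match cur with
      | none => []          -- Python would raise KeyError on predecessors[None]; outside Pre_
      | some c =>
        match d.get? c with
        | none => []        -- KeyError; outside Pre_
        | some nxt => pvLoop2 d cstart fuel nxt (cyc ++ [c])

-- A's first while loop: visited/path/current, then the cycle_start phase on a repeat.
def pvLoop1 (d : PySem.Dict String (Option String)) :
    Nat → PySem.Set String → List String → String → List String
  | 0, _, _, _ => []
  | fuel+1, visited, path, cur =>
    if PySem.Set.contains visited cur then
      -- cycle_start = current; cycle = [cycle_start]; current = predecessors[cycle_start]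
      match d.get? cur with
      | none => []          -- KeyError; outside Pre_
      | some nxt => pvLoop2 d cur (d.size + 2) nxt [cur]
    else
      match d.get? cur with
      | none => []          -- KeyError; outside Pre_
      | some none => []     -- predecessors[current] is None → return []
      | some (some nxt) => pvLoop1 d fuel (PySem.Set.add visited cur) (path ++ [cur]) nxt

def reconstruct_cycle (predecessors : List (String × Option String)) (start : String) : List String :=
  let d := PySem.Dict.ofList predecessors
  pvLoop1 d (d.size + 2) PySem.Set.empty [] start

-- ===== PORT B =====
-- B's single walk: `index` maps each path node to its position; on a repeat the cycle is
-- [current] + path[i:][::-1].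
def pvWalkB (d : PySem.Dict String (Option String)) :
    Nat → List String → PySem.Dict String Int → String → List String
  | 0, _, _, _ => []
  | fuel+1, path, index, cur =>
    match index.get? cur with
    | some i => cur :: (PySem.List.slice path (some i) none).reverse
    | none =>
      match d.get? cur with
      | none => []          -- KeyError; outside Pre_
      | some none => []     -- nxt is None → return []
      | some (some nxt) => pvWalkB d fuel (path ++ [cur]) (index.insert cur (path.length : Int)) nxt

def reconstruct_cycle_alt (predecessors : List (String × Option String)) (start : String) : List String :=
  let d := PySem.Dict.ofList predecessors
  pvWalkB d (d.size + 2) [] PySem.Dict.empty start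

-- ===== PRECONDITION & SPEC =====
-- Pre_ requires a closed predecessor map: start is a key and every non-None value is a key, so
-- the walk can never reach a missing key (where A raises KeyError). This also excludes some
-- unclosed maps on which A's walk happens to stop at a None first and returns [] (B returns [] too).
def Pre_reconstruct_cycle (predecessors : List (String × Option String)) (start : String) : Prop :=
  start ∈ predecessors.map Prod.fst ∧
    ∀ v ∈ predecessors.filterMap Prod.snd, v ∈ predecessors.map Prod.fst
instance (predecessors : List (String × Option String)) (start : String) : Decidable (Pre_reconstruct_cycle predecessors start) := by unfold Pre_reconstruct_cycle; infer_instance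

def pvWitness_reconstruct_cycle : (List (String × Option String)) × String := ([("a", some "a")], "a")

def Spec_reconstruct_cycle (predecessors : List (String × Option String)) (start : String) (out : List String) : Prop := out = reconstruct_cycle_alt predecessors start
instance (predecessors : List (String × Option String)) (start : String) (out : List String) : Decidable (Spec_reconstruct_cycle predecessors start out) := by unfold Spec_reconstruct_cycle; infer_instance

-- ===== CLAIM (what is proved, stated in full; the proofs are below) =====
def Claim_equal_reconstruct_cycle : Prop := ∀ (predecessors : List (String × Option String)) (start : String), Dom_reconstruct_cycle predecessors start → Pre_reconstruct_cycle predecessors start → Spec_reconstruct_cycle predecessors start (reconstruct_cycle predecessors start)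

-- ===== LEMMAS AND PROOFS =====

-- the predecessor-link relation of the walk
def pvR (d : PySem.Dict String (Option String)) (x y : String) : Prop :=
  d.get? x = some (some y)

lemma pvLoop2_run (d : PySem.Dict String (Option String)) (c : String) :
    ∀ (suf : List String) (acc : List String) (g : Nat), suf.length < g →
      (∀ x ∈ suf, x ≠ c) →
      List.IsChain (pvR d) (suf ++ [c]) →
      pvLoop2 d c g (some (suf.headD c)) acc = (acc ++ suf ++ [c]).reverse := by
  intro suf
  induction suf with
  | nil =>
    intro acc g hg _ _
    match g, hg with
    | g+1, _ => simp [pvLoop2]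
  | cons x rest ih =>
    intro acc g hg hne hch
    match g, hg with
    | g+1, hg =>
      have hxc : x ≠ c := hne x (by simp)
      have hstep : pvR d x ((rest ++ [c]).headD c) := by
        rw [List.cons_append, List.isChain_cons] at hch
        apply hch.1
        cases rest <;> simp
      have hhead : (rest ++ [c]).headD c = rest.headD c := by cases rest <;> simp
      rw [hhead] at hstep
      simp only [pvR] at hstep
      simp only [pvLoop2, List.headD_cons]
      rw [if_neg (by simpa using hxc)]
      rw [hstep]
      show pvLoop2 d c g (some (rest.headD c)) (acc ++ [x]) = (acc ++ x :: rest ++ [c]).reverse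
      rw [ih (acc ++ [x]) g (by simpa using hg) (fun y hy => hne y (by simp [hy]))
            (by rw [List.cons_append, List.isChain_cons] at hch; exact hch.2)]
      simp

lemma pvMain (d : PySem.Dict String (Option String))
    (hcl : ∀ k v, d.get? k = some (some v) → v ∈ d.keys) :
    ∀ (fuel : Nat) (path : List String) (index : PySem.Dict String Int) (cur : String),
      path.Nodup →
      (∀ x, index.get? x = if x ∈ path then some ((List.idxOf x path : Nat) : Int) else none) →
      List.IsChain (pvR d) (path ++ [cur]) →
      cur ∈ d.keys →
      (∀ x ∈ path, x ∈ d.keys) →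
      d.size + 2 = fuel + path.length →
      pvLoop1 d fuel path path cur = pvWalkB d fuel path index cur := by
  intro fuel
  induction fuel with
  | zero =>
    intro path index cur hnd _ _ _ hsub hfuel
    exfalso
    have hle : path.length ≤ d.keys.length :=
      (hnd.subperm (fun x hx => hsub x hx)).length_le
    have : d.keys.length = d.size := by
      simp [PySem.Dict.keys, PySem.Dict.size]
    omega
  | succ fuel ih =>
    intro path index cur hnd hidx hch hk hsub hfuel
    have hcontains : PySem.Set.contains path cur = decide (cur ∈ path) := by
      simp [PySem.Set.contains]
    obtain ⟨w, hw⟩ : ∃ w, d.get? cur = some w := by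
      cases hget : d.get? cur with
      | none => exact absurd ((PySem.Dict.get?_eq_none_iff_not_mem_keys d cur).mp hget) (by simp [hk])
      | some w => exact ⟨w, rfl⟩
    by_cases hm : cur ∈ path
    · -- the walk has closed: A retraces the cycle, B slices the path
      set i := List.idxOf cur path with hidef
      have hi : i < path.length := List.idxOf_lt_length_of_mem hm
      have hcur : path[i] = cur := List.getElem_idxOf hi
      have hdropdecomp : path.drop i = cur :: path.drop (i+1) := by
        rw [List.drop_eq_getElem_cons hi, hcur]
      set suf := path.drop (i+1) with hsufdef
      have hsuffix : (path.drop i) ++ [cur] <:+ path ++ [cur] := by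
        refine ⟨path.take i, ?_⟩
        rw [← List.append_assoc, List.take_append_drop]
      have hch2 : List.IsChain (pvR d) (cur :: (suf ++ [cur])) := by
        have := hch.suffix hsuffix
        rwa [hdropdecomp, List.cons_append] at this
      have hchsuf : List.IsChain (pvR d) (suf ++ [cur]) :=
        (List.isChain_cons.mp hch2).2
      have hstep : pvR d cur (suf.headD cur) := by
        apply (List.isChain_cons.mp hch2).1
        cases suf <;> simp
      have hne : ∀ x ∈ suf, x ≠ cur := by
        intro x hx hxc
        obtain ⟨t, ht, hxt⟩ := List.mem_iff_getElem.mp hx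
        have ht' : i + 1 + t < path.length := by
          have := ht; simp [hsufdef] at this; omega
        have : path[i + 1 + t] = path[i] := by
          rw [hcur, ← hxc, ← hxt]
          simp [hsufdef, List.getElem_drop]
        have := (hnd.getElem_inj_iff).mp this
        omega
      have hsuflen : suf.length < d.size + 2 := by
        have : suf.length ≤ path.length := by simp [hsufdef]
        omega
      have hwval : w = some (suf.headD cur) := by
        have := hstep
        unfold pvR at this
        rw [hw] at this
        exact (Option.some.injEq _ _).mp this
      simp only [pvLoop1, pvWalkB, hcontains, hm, decide_true, if_true]
      rw [hidx cur, if_pos hm, hw, hwval]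
      show pvLoop2 d cur (d.size + 2) (some (suf.headD cur)) [cur]
        = cur :: (PySem.List.slice path (some (i : Int))).reverse
      rw [pvLoop2_run d cur suf [cur] (d.size + 2) hsuflen hne hchsuf]
      rw [PySem.List.slice_from_natCast path i, hdropdecomp]
      simp
    · -- new node: both walks advance
      simp only [pvLoop1, pvWalkB, hcontains, hm, decide_false]
      rw [hidx cur, if_neg hm, hw]
      cases w with
      | none => rfl
      | some nxt =>
        have hadd : PySem.Set.add path cur = path ++ [cur] := by
          simp [PySem.Set.add, PySem.Set.contains, hm]
        rw [hadd]
        apply ih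
        · rw [List.nodup_append]
          exact ⟨hnd, List.nodup_singleton _, by
            intro a ha b hb
            simp at hb
            subst hb
            exact fun h => hm (h ▸ ha)⟩
        · intro x
          rw [PySem.Dict.get?_insert]
          by_cases hx : x = cur
          · subst hx
            rw [if_pos rfl, if_pos (by simp)]
            rw [List.idxOf_append_of_notMem hm, List.idxOf_cons_self]
            simp
          · rw [if_neg hx, hidx x]
            by_cases hxp : x ∈ path
            · rw [if_pos hxp, if_pos (by simp [hxp]), List.idxOf_append_of_mem hxp]
            · rw [if_neg hxp, if_neg (by simp [hxp, hx])]
        · rw [List.isChain_append]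
          refine ⟨hch, by simp, ?_⟩
          intro a ha b hb
          simp [List.getLast?_append] at ha
          simp at hb
          subst hb
          rw [← ha]
          exact hw
        · exact hcl cur nxt hw
        · intro x hx
          rcases List.mem_append.mp hx with h | h
          · exact hsub x h
          · simp at h; subst h; exact hk
        · simp; omega

lemma pvKeys_ofList (predecessors : List (String × Option String)) :
    (PySem.Dict.ofList predecessors).keys = PySem.Set.ofList (predecessors.map Prod.fst) := by
  have := PySem.Dict.keys_foldl_insert_key (ν := Option String) predecessors Prod.fst
    (fun _ p => p.2) PySem.Dict.empty
  simpa [PySem.Dict.ofList, PySem.Dict.update, PySem.Dict.keys_empty, PySem.Set.update_empty]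
    using this

lemma pvItems_foldl_subset (l : List (String × Option String)) :
    ∀ (d : PySem.Dict String (Option String)) p,
      p ∈ (l.foldl (fun acc q => acc.insert q.1 q.2) d).items → p ∈ d.items ∨ p ∈ l := by
  induction l with
  | nil => intro d p h; exact Or.inl h
  | cons q rest ih =>
    intro d p h
    rcases ih (d.insert q.1 q.2) p h with h' | h'
    · rcases (PySem.Dict.mem_items_insert d q.1 q.2 p).mp h' with h'' | h''
      · right; rw [h'']; simp
      · exact Or.inl h''.1
    · right; right; exact h'

-- ===== VERDICT (by name: the statement is the Claim_ definition above) =====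
theorem reconstruct_cycle_spec : Claim_equal_reconstruct_cycle := by
  intro predecessors start _dom hpre
  unfold Spec_reconstruct_cycle reconstruct_cycle reconstruct_cycle_alt
  obtain ⟨hstart, hclosed⟩ := hpre
  have hkeys : ∀ x, x ∈ (PySem.Dict.ofList predecessors).keys ↔ x ∈ predecessors.map Prod.fst := by
    intro x; rw [pvKeys_ofList]; exact PySem.Set.mem_ofList _ _
  apply pvMain
  · intro k v hget
    have hmem : (k, some v) ∈ (PySem.Dict.ofList predecessors).items :=
      PySem.Dict.mem_items_of_get?_eq_some _ hget
    have : (k, some v) ∈ predecessors := by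
      rcases pvItems_foldl_subset predecessors PySem.Dict.empty (k, some v) hmem with h | h
      · simp [PySem.Dict.empty] at h
      · exact h
    rw [hkeys]
    exact hclosed v (List.mem_filterMap.mpr ⟨(k, some v), this, rfl⟩)
  · exact List.nodup_nil
  · intro x; simp [PySem.Dict.get?_empty]
  · simp
  · rw [hkeys]; exact hstart
  · intro x hx; simp at hx
  · simp
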